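-- pv_equiv track=rewrite | github.com/smaurice69/adventofcode | 2017/day24.py | iterdep2
-- ===== SOURCE A (Python) =====
-- from functools import lru_cache
--
-- def iterdep2(comp, input_port):
--
--     comp = tuple(comp)
--
--     @lru_cache(None)
--     def dfs(components, port):
--         best_len = 0
--         best_strength = 0
--         best_bridge = []
--
--         comp_list = list(components)
--
--         for a, b in comp_list:
--             if a == port or b == port:
--
--                 original = (a, b)
--
--                 # orient
--                 if b == port:
--                     a, b = b, a
--
--                 # remove used component
--                 remaining = comp_list.copy()
--                 remaining.remove(original)
--
--                 local_strength = a + b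
--
--                 sub_len, sub_strength, sub_bridge = dfs(tuple(remaining), b)
--
--                 total_len = 1 + sub_len
--                 total_strength = local_strength + sub_strength
--                 total_bridge = [(a, b)] + sub_bridge
--
--                 # PRIORITY RULE:
--                 # 1. longer is better
--                 # 2. if equal length, stronger is better
--                 if (total_len > best_len or
--                     (total_len == best_len and total_strength > best_strength)):
--                     best_len = total_len
--                     best_strength = total_strength
--                     best_bridge = total_bridge
--
--         return best_len, best_strength, best_bridge
--
--     return dfs(comp, input_port)
-- ===== SOURCE B (Python) =====
-- def iterdep2(comp, input_port):
--     # Accumulator-threading DFS: carries the partial bridge's length/strength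
--     # down and keeps one running best, instead of best-from-subtree + memo.
--     best = [0, 0, []]
--
--     def walk(components, port, length, strength, bridge):
--         if length > best[0] or (length == best[0] and strength > best[1]):
--             best[0], best[1], best[2] = length, strength, bridge
--         for a, b in components:
--             if a == port or b == port:
--                 if b == port:
--                     x, y = b, a
--                 else:
--                     x, y = a, b
--                 rest = list(components)
--                 rest.remove((a, b))
--                 walk(rest, y, length + 1, strength + x + y, bridge + [(x, y)])
--
--     walk(list(comp), input_port, 0, 0, [])
--     return best[0], best[1], best[2]
-- ===== Notes on version B (the rewrite author's own statement) =====
-- stated objective: alternative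
-- what changed: Replaces A's memoized best-from-subtree recursion (each call returns the best bridge of its subtree, prefixed upward) with a single accumulator-threading DFS that carries the partial bridge's length/strength/list downward and updates one running best tuple with the same strict lexicographic comparison, visiting components in the same order.
import Mathlib
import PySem

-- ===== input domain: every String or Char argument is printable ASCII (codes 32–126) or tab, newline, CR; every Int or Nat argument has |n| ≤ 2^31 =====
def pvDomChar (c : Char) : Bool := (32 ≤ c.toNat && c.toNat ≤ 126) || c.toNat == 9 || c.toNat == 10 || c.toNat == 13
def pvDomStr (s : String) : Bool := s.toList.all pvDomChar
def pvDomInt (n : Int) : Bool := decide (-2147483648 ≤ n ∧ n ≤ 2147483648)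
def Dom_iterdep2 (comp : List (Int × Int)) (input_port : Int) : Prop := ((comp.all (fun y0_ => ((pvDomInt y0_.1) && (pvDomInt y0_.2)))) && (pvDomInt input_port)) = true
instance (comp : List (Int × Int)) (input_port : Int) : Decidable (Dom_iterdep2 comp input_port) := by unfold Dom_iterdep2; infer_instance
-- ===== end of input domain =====

-- B is an accumulator-threading DFS with one running best (no memoization) in place of
-- A's best-from-subtree recursion; equal return values, no speed claim.

-- ===== PORT A =====
-- A's inner dfs: the `for` loop over the components is a foldl with `best` as the loop
-- accumulator; the recursion is guarded by a fuel argument (fuel = comp.length + 1 always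
-- suffices, since each recursive call removes one component) — a pure totality device.
-- lru_cache only memoizes a pure function, so it is dropped without changing the value.
def dfsA : Nat → List (Int × Int) → Int → Int × Int × List (Int × Int)
  | 0, _, _ => (0, 0, [])
  | fuel + 1, comps, port =>
    comps.foldl (fun best p =>
      let a := p.1
      let b := p.2
      if a = port ∨ b = port then
        -- orient
        let x := if b = port then b else a
        let y := if b = port then a else b
        -- remove used component (first occurrence, as Python's list.remove)
        let remaining := comps.erase p
        let sub := dfsA fuel remaining y
        let total_len := 1 + sub.1
        let total_strength := (x + y) + sub.2.1
        let total_bridge := (x, y) :: sub.2.2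
        if total_len > best.1 ∨ (total_len = best.1 ∧ total_strength > best.2.1) then
          (total_len, total_strength, total_bridge)
        else best
      else best) (0, 0, [])

def iterdep2 (comp : List (Int × Int)) (input_port : Int) : Int × Int × (List (Int × Int)) :=
  dfsA (comp.length + 1) comp input_port

-- ===== PORT B =====
-- B's update of the running best at entry to walk
def pvUpd (L S : Int) (Br : List (Int × Int)) (best : Int × Int × List (Int × Int)) :
    Int × Int × List (Int × Int) :=
  if L > best.1 ∨ (L = best.1 ∧ S > best.2.1) then (L, S, Br) else best

-- B's walk: accumulators length/strength/bridge are threaded down, the running best is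
-- threaded through the loop (a foldl); same fuel device for totality.
def walkB : Nat → List (Int × Int) → Int → Int → Int → List (Int × Int) →
    (Int × Int × List (Int × Int)) → Int × Int × List (Int × Int)
  | 0, _, _, _, _, _, best => best
  | fuel + 1, comps, port, length, strength, bridge, best =>
    comps.foldl (fun bst p =>
      let a := p.1
      let b := p.2
      if a = port ∨ b = port then
        let x := if b = port then b else a
        let y := if b = port then a else b
        let rest := comps.erase p
        walkB fuel rest y (length + 1) (strength + (x + y)) (bridge ++ [(x, y)]) bst
      else bst) (pvUpd length strength bridge best)

def iterdep2_alt (comp : List (Int × Int)) (input_port : Int) : Int × Int × (List (Int × Int)) :=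
  walkB (comp.length + 1) comp input_port 0 0 [] (0, 0, [])

-- ===== PRECONDITION & SPEC =====
def Spec_iterdep2 (comp : List (Int × Int)) (input_port : Int) (out : Int × Int × (List (Int × Int))) : Prop := out = iterdep2_alt comp input_port
instance (comp : List (Int × Int)) (input_port : Int) (out : Int × Int × (List (Int × Int))) : Decidable (Spec_iterdep2 comp input_port out) := by unfold Spec_iterdep2; infer_instance

-- ===== CLAIM (what is proved, stated in full; the proofs are below) =====
def Claim_equal_iterdep2 : Prop := ∀ (comp : List (Int × Int)) (input_port : Int), Dom_iterdep2 comp input_port → Spec_iterdep2 comp input_port (iterdep2 comp input_port)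

-- ===== LEMMAS AND PROOFS =====

-- left-biased max by (length, strength), strict lexicographic
def pvBetter (b c : Int × Int × List (Int × Int)) : Int × Int × List (Int × Int) :=
  if b.1 < c.1 ∨ (b.1 = c.1 ∧ b.2.1 < c.2.1) then c else b

def pvShift (L S : Int) (Br : List (Int × Int)) (c : Int × Int × List (Int × Int)) :
    Int × Int × List (Int × Int) :=
  (L + c.1, S + c.2.1, Br ++ c.2.2)

theorem pvUpd_eq (L S : Int) (Br : List (Int × Int)) (best : Int × Int × List (Int × Int)) :
    pvUpd L S Br best = pvBetter best (pvShift L S Br (0, 0, [])) := by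
  unfold pvUpd pvBetter pvShift; dsimp only; simp only [add_zero, List.append_nil]; split_ifs <;> first | rfl | omega

theorem pvBetter_assoc (a b c : Int × Int × List (Int × Int)) :
    pvBetter a (pvBetter b c) = pvBetter (pvBetter a b) c := by
  unfold pvBetter; split_ifs <;> first | rfl | omega

theorem pvShift_better (L S : Int) (Br : List (Int × Int))
    (b c : Int × Int × List (Int × Int)) :
    pvShift L S Br (pvBetter b c) = pvBetter (pvShift L S Br b) (pvShift L S Br c) := by
  unfold pvBetter pvShift; dsimp only; split_ifs <;> first | rfl | omega

theorem pvShift_compose (L S x y : Int) (Br : List (Int × Int))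
    (c : Int × Int × List (Int × Int)) :
    pvShift (L + 1) (S + (x + y)) (Br ++ [(x, y)]) c =
      pvShift L S Br (1 + c.1, (x + y) + c.2.1, (x, y) :: c.2.2) := by
  unfold pvShift
  dsimp only
  simp only [Prod.mk.injEq]
  refine ⟨by omega, by omega, by simp⟩

theorem pvShift_zero (c : Int × Int × List (Int × Int)) : pvShift 0 0 [] c = c := by
  unfold pvShift; simp

-- KEY: B's walk from an accumulated prefix equals the prefix-shifted value of A's dfs,
-- merged into the running best.
theorem walkB_eq_dfsA : ∀ (fuel : Nat) (comps : List (Int × Int)), comps.length < fuel →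
    ∀ (port L S : Int) (Br : List (Int × Int)) (best : Int × Int × List (Int × Int)),
    walkB fuel comps port L S Br best =
      pvBetter best (pvShift L S Br (dfsA fuel comps port)) := by
  intro fuel
  induction fuel with
  | zero => intro comps h; omega
  | succ fuel ih =>
    intro comps hlen port L S Br best
    suffices h : ∀ (l : List (Int × Int)), (∀ p ∈ l, p ∈ comps) →
        ∀ (b0 cur : Int × Int × List (Int × Int)),
        List.foldl (fun bst p =>
          if p.1 = port ∨ p.2 = port then
            walkB fuel (comps.erase p) (if p.2 = port then p.1 else p.2) (L + 1)
              (S + ((if p.2 = port then p.2 else p.1) + (if p.2 = port then p.1 else p.2)))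
              (Br ++ [((if p.2 = port then p.2 else p.1), (if p.2 = port then p.1 else p.2))]) bst
          else bst) (pvBetter cur (pvShift L S Br b0)) l =
        pvBetter cur (pvShift L S Br (List.foldl (fun best p =>
          if p.1 = port ∨ p.2 = port then
            if 1 + (dfsA fuel (comps.erase p) (if p.2 = port then p.1 else p.2)).1 > best.1 ∨
               (1 + (dfsA fuel (comps.erase p) (if p.2 = port then p.1 else p.2)).1 = best.1 ∧
                ((if p.2 = port then p.2 else p.1) + (if p.2 = port then p.1 else p.2)) +
                  (dfsA fuel (comps.erase p) (if p.2 = port then p.1 else p.2)).2.1 > best.2.1) then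
              (1 + (dfsA fuel (comps.erase p) (if p.2 = port then p.1 else p.2)).1,
               ((if p.2 = port then p.2 else p.1) + (if p.2 = port then p.1 else p.2)) +
                 (dfsA fuel (comps.erase p) (if p.2 = port then p.1 else p.2)).2.1,
               ((if p.2 = port then p.2 else p.1), (if p.2 = port then p.1 else p.2)) ::
                 (dfsA fuel (comps.erase p) (if p.2 = port then p.1 else p.2)).2.2)
            else best
          else best) b0 l)) by
      have h2 := h comps (fun p hp => hp) (0, 0, []) best
      rw [← pvUpd_eq] at h2
      exact h2
    intro l
    induction l with
    | nil => intro _ b0 cur; rfl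
    | cons p rest ihl =>
      intro hmem b0 cur
      simp only [List.foldl_cons]
      by_cases hc : p.1 = port ∨ p.2 = port
      · simp only [hc, if_true]
        set x := if p.2 = port then p.2 else p.1 with hx
        set y := if p.2 = port then p.1 else p.2 with hy
        set sub := dfsA fuel (comps.erase p) y with hsub
        have hp : p ∈ comps := hmem p List.mem_cons_self
        have herase : (comps.erase p).length < fuel := by
          have h1 := List.length_erase_of_mem hp
          have h2 := List.length_pos_of_mem hp
          omega
        have hcall : walkB fuel (comps.erase p) y (L + 1) (S + (x + y)) (Br ++ [(x, y)])
            (pvBetter cur (pvShift L S Br b0)) =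
            pvBetter (pvBetter cur (pvShift L S Br b0))
              (pvShift L S Br (1 + sub.1, (x + y) + sub.2.1, (x, y) :: sub.2.2)) := by
          rw [ih (comps.erase p) herase, ← hsub, pvShift_compose]
        rw [hcall, ← pvBetter_assoc, ← pvShift_better]
        have hupd : (if 1 + sub.1 > b0.1 ∨ (1 + sub.1 = b0.1 ∧ (x + y) + sub.2.1 > b0.2.1)
            then ((1 + sub.1 : Int), ((x + y) + sub.2.1 : Int), (x, y) :: sub.2.2) else b0) =
            pvBetter b0 (1 + sub.1, (x + y) + sub.2.1, (x, y) :: sub.2.2) := by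
          unfold pvBetter; dsimp only; split_ifs <;> first | rfl | omega
        rw [hupd]
        exact ihl (fun q hq => hmem q (List.mem_cons_of_mem p hq))
          (pvBetter b0 (1 + sub.1, (x + y) + sub.2.1, (x, y) :: sub.2.2)) cur
      · simp only [hc, if_false]
        exact ihl (fun q hq => hmem q (List.mem_cons_of_mem p hq)) b0 cur

-- A's result is the empty bridge or has length ≥ 1
theorem dfsA_pos : ∀ (fuel : Nat) (comps : List (Int × Int)) (port : Int),
    dfsA fuel comps port = (0, 0, []) ∨ 1 ≤ (dfsA fuel comps port).1 := by
  intro fuel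
  induction fuel with
  | zero => intro comps port; left; rfl
  | succ fuel ih =>
    intro comps port
    suffices h : ∀ (l : List (Int × Int)) (b0 : Int × Int × List (Int × Int)),
        (b0 = (0, 0, []) ∨ 1 ≤ b0.1) →
        (List.foldl (fun best p =>
          if p.1 = port ∨ p.2 = port then
            if 1 + (dfsA fuel (comps.erase p) (if p.2 = port then p.1 else p.2)).1 > best.1 ∨
               (1 + (dfsA fuel (comps.erase p) (if p.2 = port then p.1 else p.2)).1 = best.1 ∧
                ((if p.2 = port then p.2 else p.1) + (if p.2 = port then p.1 else p.2)) +
                  (dfsA fuel (comps.erase p) (if p.2 = port then p.1 else p.2)).2.1 > best.2.1) then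
              (1 + (dfsA fuel (comps.erase p) (if p.2 = port then p.1 else p.2)).1,
               ((if p.2 = port then p.2 else p.1) + (if p.2 = port then p.1 else p.2)) +
                 (dfsA fuel (comps.erase p) (if p.2 = port then p.1 else p.2)).2.1,
               ((if p.2 = port then p.2 else p.1), (if p.2 = port then p.1 else p.2)) ::
                 (dfsA fuel (comps.erase p) (if p.2 = port then p.1 else p.2)).2.2)
            else best
          else best) b0 l = (0, 0, []) ∨
         1 ≤ (List.foldl (fun best p =>
          if p.1 = port ∨ p.2 = port then
            if 1 + (dfsA fuel (comps.erase p) (if p.2 = port then p.1 else p.2)).1 > best.1 ∨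
               (1 + (dfsA fuel (comps.erase p) (if p.2 = port then p.1 else p.2)).1 = best.1 ∧
                ((if p.2 = port then p.2 else p.1) + (if p.2 = port then p.1 else p.2)) +
                  (dfsA fuel (comps.erase p) (if p.2 = port then p.1 else p.2)).2.1 > best.2.1) then
              (1 + (dfsA fuel (comps.erase p) (if p.2 = port then p.1 else p.2)).1,
               ((if p.2 = port then p.2 else p.1) + (if p.2 = port then p.1 else p.2)) +
                 (dfsA fuel (comps.erase p) (if p.2 = port then p.1 else p.2)).2.1,
               ((if p.2 = port then p.2 else p.1), (if p.2 = port then p.1 else p.2)) ::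
                 (dfsA fuel (comps.erase p) (if p.2 = port then p.1 else p.2)).2.2)
            else best
          else best) b0 l).1) by
      exact h comps (0, 0, []) (Or.inl rfl)
    intro l
    induction l with
    | nil => intro b0 hb; simpa using hb
    | cons p rest ihl =>
      intro b0 hb
      simp only [List.foldl_cons]
      apply ihl
      have hs1 : ∀ z : Int, (0 : Int) ≤ (dfsA fuel (comps.erase p) z).1 := by
        intro z
        rcases ih (comps.erase p) z with h | h
        · rw [h]
        · omega
      have h1 := hs1 p.1
      have h2 := hs1 p.2
      split_ifs <;> first | exact hb | (right; dsimp only; omega)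

theorem pvBetter_base (c : Int × Int × List (Int × Int))
    (h : c = (0, 0, []) ∨ 1 ≤ c.1) : pvBetter (0, 0, []) c = c := by
  rcases h with h | h
  · subst h; unfold pvBetter; simp
  · unfold pvBetter; rw [if_pos]; left; simpa using h

-- ===== VERDICT (by name: the statement is the Claim_ definition above) =====
theorem iterdep2_spec : Claim_equal_iterdep2 := by
  intro comp input_port _
  unfold Spec_iterdep2 iterdep2 iterdep2_alt
  rw [walkB_eq_dfsA (comp.length + 1) comp (by omega), pvShift_zero]
  exact (pvBetter_base _ (dfsA_pos (comp.length + 1) comp input_port)).symm
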